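-- pv_equiv track=rewrite | github.com/Modeba/NeetCode-150 | Leetcode 1509. Minimum Difference Between Largest and Smallest Value in Three Moves.py | minDifferenceFast
-- ===== SOURCE A (Python) =====
-- import heapq
--
-- def minDifferenceFast(nums):
--     if len(nums) <= 4:
--         return 0
--
--     min_four = sorted(heapq.nsmallest(4, nums))
--     max_four = sorted(heapq.nlargest(4, nums))
--
--     res = max_four[0] - min_four[0]
--     for i in range(1, 4):
--         res = min(res, max_four[i] - min_four[i])
--
--     return res
-- ===== SOURCE B (Python) =====
-- def minDifferenceFast(nums):
--     if len(nums) <= 4: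
--         return 0
--     s = sorted(nums)
--     n = len(s)
--     return min(s[n - 4 + i] - s[i] for i in range(4))
-- ===== Notes on version B (the rewrite author's own statement) =====
-- stated objective: simpler
-- what changed: Replaces heap-based partial selection (nsmallest/nlargest) plus two extra 4-element sorts and an accumulator loop with one full sort and a single min over the four aligned smallest/largest pairs.
import Mathlib
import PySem

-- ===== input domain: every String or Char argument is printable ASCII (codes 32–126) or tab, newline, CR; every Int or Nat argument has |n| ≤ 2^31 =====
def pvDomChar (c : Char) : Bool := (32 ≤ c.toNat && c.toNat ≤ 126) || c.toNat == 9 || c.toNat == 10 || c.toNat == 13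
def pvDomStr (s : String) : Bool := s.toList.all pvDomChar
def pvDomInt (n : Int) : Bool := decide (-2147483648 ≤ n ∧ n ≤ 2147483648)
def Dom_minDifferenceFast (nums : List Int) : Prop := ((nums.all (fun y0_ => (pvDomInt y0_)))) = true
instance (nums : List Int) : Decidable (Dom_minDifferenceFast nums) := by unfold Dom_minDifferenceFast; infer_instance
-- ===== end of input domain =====

-- B replaces A's heap-based nsmallest/nlargest selection plus two 4-element sorts and an
-- accumulator loop by one full sort and a single min over the four aligned pairs (simpler).

-- ===== PORT A =====
-- heapq.nsmallest(4, nums) = sorted(nums)[:4]; heapq.nlargest(4, nums) = sorted(nums, reverse=True)[:4]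
def minDifferenceFast (nums : List Int) : Int :=
  if nums.length ≤ 4 then 0
  else
    let min_four := PySem.List.sorted ((PySem.List.sorted nums (fun x => x) false).take 4) (fun x => x) false
    let max_four := PySem.List.sorted ((PySem.List.sorted nums (fun x => x) true).take 4) (fun x => x) false
    let res := PySem.List.pyGetD max_four 0 0 - PySem.List.pyGetD min_four 0 0
    (PySem.List.pyRange 1 4 1).foldl
      (fun res i => min res (PySem.List.pyGetD max_four i 0 - PySem.List.pyGetD min_four i 0)) res

-- ===== PORT B =====
def minDifferenceFast_alt (nums : List Int) : Int :=
  if nums.length ≤ 4 then 0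
  else
    let s := PySem.List.sorted nums (fun x => x) false
    let n : Int := s.length
    (PySem.List.min?
      ((PySem.List.pyRange 0 4 1).map
        (fun i => PySem.List.pyGetD s (n - 4 + i) 0 - PySem.List.pyGetD s i 0))
      (fun x => x)).getD 0

-- ===== PRECONDITION & SPEC =====
def Spec_minDifferenceFast (nums : List Int) (out : Int) : Prop := out = minDifferenceFast_alt nums
instance (nums : List Int) (out : Int) : Decidable (Spec_minDifferenceFast nums out) := by unfold Spec_minDifferenceFast; infer_instance

-- ===== CLAIM (what is proved, stated in full; the proofs are below) =====
def Claim_equal_minDifferenceFast : Prop := ∀ (nums : List Int), Dom_minDifferenceFast nums → Spec_minDifferenceFast nums (minDifferenceFast nums)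

-- ===== LEMMAS AND PROOFS =====

-- the descending sort of an Int list is the reverse of the ascending sort
lemma sorted_rev_eq_reverse (nums : List Int) :
    PySem.List.sorted nums (fun x => x) true = (PySem.List.sorted nums (fun x => x) false).reverse := by
  refine List.Perm.eq_of_pairwise (le := fun a b : Int => b ≤ a)
    (fun a b _ _ h1 h2 => le_antisymm h2 h1) ?_ ?_ ?_
  · exact PySem.List.sorted_pairwise_rev nums (fun x => x)
  · rw [List.pairwise_reverse]
    exact PySem.List.sorted_pairwise nums (fun x => x)
  · exact (PySem.List.sorted_perm nums _ _).trans
      ((PySem.List.sorted_perm nums _ _).symm.trans (List.reverse_perm _).symm)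

-- indexing into the dropped tail of a sorted list = indexing the sorted list near its end
lemma drop_idx (s : List Int) (h5 : 5 ≤ s.length) (i : Int) (h0 : 0 ≤ i) (h4 : i < 4) :
    PySem.List.pyGetD (s.drop (s.length - 4)) i 0 = PySem.List.pyGetD s ((s.length : Int) - 4 + i) 0 := by
  rw [PySem.List.pyGetD_eq_getElem _ _ h0 (by simp [List.length_drop]; omega),
      PySem.List.pyGetD_eq_getElem _ _ (by omega) (by omega)]
  rw [List.getElem_drop]
  congr 1
  omega

-- indexing a 4-element prefix = indexing the list itself
lemma take_idx (s : List Int) (h5 : 4 ≤ s.length) (i : Int) (h0 : 0 ≤ i) (h4 : i < 4) :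
    PySem.List.pyGetD (s.take 4) i 0 = PySem.List.pyGetD s i 0 := by
  rw [PySem.List.pyGetD_eq_getElem _ _ h0 (by simp [List.length_take]; omega),
      PySem.List.pyGetD_eq_getElem _ _ h0 (by omega)]
  exact List.getElem_take

-- min_four: re-sorting the first four of the ascending sort changes nothing
lemma min_four_eq (nums : List Int) :
    PySem.List.sorted ((PySem.List.sorted nums (fun x => x) false).take 4) (fun x => x) false
      = (PySem.List.sorted nums (fun x => x) false).take 4 := by
  exact PySem.List.sorted_eq_self_of_pairwise _ _
    ((PySem.List.sorted_pairwise nums (fun x => x)).sublist (List.take_sublist 4 _))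

-- max_four: the first four of the descending sort, re-sorted ascending, are the last four of the ascending sort
lemma max_four_eq (nums : List Int) :
    PySem.List.sorted ((PySem.List.sorted nums (fun x => x) true).take 4) (fun x => x) false
      = (PySem.List.sorted nums (fun x => x) false).drop (nums.length - 4) := by
  have hlen : (PySem.List.sorted nums (fun x => x) false).length = nums.length :=
    (PySem.List.sorted_perm nums _ _).length_eq
  rw [sorted_rev_eq_reverse, List.take_reverse, hlen]
  exact PySem.List.sorted_id_eq_of_perm_of_pairwise _ _
    (List.reverse_perm _).symm
    ((PySem.List.sorted_pairwise nums (fun x => x)).sublist (List.drop_sublist _ _))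

-- ===== VERDICT (by name: the statement is the Claim_ definition above) =====
theorem minDifferenceFast_spec : Claim_equal_minDifferenceFast := by
  intro nums _
  show minDifferenceFast nums = minDifferenceFast_alt nums
  unfold minDifferenceFast minDifferenceFast_alt
  by_cases h : nums.length ≤ 4
  · simp [h]
  · rw [if_neg h, if_neg h]
    have hlen : (PySem.List.sorted nums (fun x => x) false).length = nums.length :=
      (PySem.List.sorted_perm nums _ _).length_eq
    set s := PySem.List.sorted nums (fun x => x) false with hs
    have h5 : 5 ≤ s.length := by omega
    rw [min_four_eq, max_four_eq nums, ← hlen]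
    rw [show PySem.List.pyRange 1 4 1 = [1,2,3] from by decide,
        show PySem.List.pyRange 0 4 1 = [0,1,2,3] from by decide]
    simp only [List.foldl, List.map, PySem.List.min?_id_cons, Option.getD_some, ← hs]
    rw [drop_idx s h5 0 (by norm_num) (by norm_num), drop_idx s h5 1 (by norm_num) (by norm_num),
        drop_idx s h5 2 (by norm_num) (by norm_num), drop_idx s h5 3 (by norm_num) (by norm_num),
        take_idx s (by omega) 0 (by norm_num) (by norm_num), take_idx s (by omega) 1 (by norm_num) (by norm_num),
        take_idx s (by omega) 2 (by norm_num) (by norm_num), take_idx s (by omega) 3 (by norm_num) (by norm_num)]
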